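-- pv_equiv track=rewrite | github.com/tumBAIS/driverAwareChargingInfrastructureDesign | optimization/positionUtils.py | findRelevantCellsForBreakpoints
-- ===== SOURCE A (Python) =====
-- def findRelevantCellsForBreakpoints(breakpoints,cells):
--     neighboringCells = {}
--     for bp in breakpoints:
--         neighboringCells[bp] = []
--         for cell in cells:
--             if bp in cells[cell]:
--                 neighboringCells[bp].append(cell)
--     return neighboringCells
-- ===== SOURCE B (Python) =====
-- def findRelevantCellsForBreakpoints(breakpoints, cells):
--     # Build an inverse index element -> [cells whose list contains it] in one pass,
--     # then answer each breakpoint by a single lookup.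
--     index = {}
--     for cell, elems in cells.items():
--         for e in dict.fromkeys(elems):  # dedup: each cell listed at most once per element
--             index.setdefault(e, []).append(cell)
--     return {bp: list(index.get(bp, [])) for bp in breakpoints}
-- ===== Notes on version B (the rewrite author's own statement) =====
-- stated objective: faster
-- what changed: Instead of scanning every cell's element list once per breakpoint, B builds an inverse index element->list of cells in a single pass over the cells and answers each breakpoint with one dictionary lookup.
import Mathlib
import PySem

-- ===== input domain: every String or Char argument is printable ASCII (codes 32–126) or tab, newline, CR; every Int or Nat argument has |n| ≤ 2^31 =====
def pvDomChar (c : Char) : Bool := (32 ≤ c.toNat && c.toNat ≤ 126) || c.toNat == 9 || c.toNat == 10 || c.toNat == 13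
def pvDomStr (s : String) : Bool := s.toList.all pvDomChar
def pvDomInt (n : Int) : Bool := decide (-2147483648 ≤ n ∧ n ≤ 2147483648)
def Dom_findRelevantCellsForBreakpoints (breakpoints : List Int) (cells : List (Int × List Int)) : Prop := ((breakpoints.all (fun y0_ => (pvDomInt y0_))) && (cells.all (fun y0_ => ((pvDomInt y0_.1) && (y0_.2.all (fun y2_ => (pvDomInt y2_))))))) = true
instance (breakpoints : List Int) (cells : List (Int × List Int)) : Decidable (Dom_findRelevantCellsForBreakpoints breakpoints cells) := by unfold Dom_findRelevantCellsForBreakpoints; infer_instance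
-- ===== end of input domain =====

-- B replaces A's per-breakpoint scan of all cells by an inverse index element→cells built
-- in one pass over the cells, answered by one lookup per breakpoint (asymptotically faster).


-- ===== PORT A =====
-- Literal port of A: for each bp set neighboringCells[bp] = [], then scan the cells dict in
-- order; 'for cell in cells' walks the keys and 'cells[cell]' is that key's value, so the scan
-- is over the (key, value) pairs; 'neighboringCells[bp].append(cell)' extends the entry at bp.
def findRelevantCellsForBreakpoints (breakpoints : List Int) (cells : List (Int × List Int)) : List (Int × List Int) :=
  (breakpoints.foldl (fun nc bp =>
      cells.foldl (fun nc cell =>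
          if cell.2.contains bp then nc.insert bp (nc.getD bp [] ++ [cell.1]) else nc)
        (nc.insert bp []))
    (PySem.Dict.empty : PySem.Dict Int (List Int))).items

-- ===== PORT B =====
-- Port of B: build the inverse index with setdefault+append (= Dict.modify with default []),
-- deduplicating each cell's element list first (dict.fromkeys = PySem.List.dedup), then one
-- lookup per breakpoint.
def findRelevantCellsForBreakpoints_alt (breakpoints : List Int) (cells : List (Int × List Int)) : List (Int × List Int) :=
  let index : PySem.Dict Int (List Int) :=
    cells.foldl (fun idx cell =>
        (PySem.List.dedup cell.2).foldl (fun idx e => idx.modify e [] (· ++ [cell.1])) idx)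
      PySem.Dict.empty
  (breakpoints.foldl (fun nc bp => nc.insert bp (index.getD bp []))
    (PySem.Dict.empty : PySem.Dict Int (List Int))).items

-- ===== PRECONDITION & SPEC =====
def Spec_findRelevantCellsForBreakpoints (breakpoints : List Int) (cells : List (Int × List Int)) (out : List (Int × List Int)) : Prop := out = findRelevantCellsForBreakpoints_alt breakpoints cells
instance (breakpoints : List Int) (cells : List (Int × List Int)) (out : List (Int × List Int)) : Decidable (Spec_findRelevantCellsForBreakpoints breakpoints cells out) := by unfold Spec_findRelevantCellsForBreakpoints; infer_instance

-- ===== CLAIM (what is proved, stated in full; the proofs are below) =====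
def Claim_equal_findRelevantCellsForBreakpoints : Prop := ∀ (breakpoints : List Int) (cells : List (Int × List Int)), Dom_findRelevantCellsForBreakpoints breakpoints cells → Spec_findRelevantCellsForBreakpoints breakpoints cells (findRelevantCellsForBreakpoints breakpoints cells)

-- ===== LEMMAS AND PROOFS =====

-- A's inner loop over the cells, started right after 'neighboringCells[bp] = v', just extends
-- the entry at bp by the keys of the cells whose value list contains bp.
theorem innerA_eq (bp : Int) (cells : List (Int × List Int))
    (d : PySem.Dict Int (List Int)) (v : List Int) :
    cells.foldl (fun nc cell =>
        if cell.2.contains bp then nc.insert bp (nc.getD bp [] ++ [cell.1]) else nc)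
      (d.insert bp v)
    = d.insert bp (v ++ (cells.filter (fun c => c.2.contains bp)).map (·.1)) := by
  induction cells generalizing v with
  | nil => simp
  | cons c cs ih =>
    simp only [List.foldl_cons, List.filter_cons]
    by_cases h : bp ∈ c.2
    · rw [if_pos (by simpa using h), PySem.Dict.getD_insert_self,
        PySem.Dict.insert_insert_self, ih]
      simp [h]
    · rw [if_neg (by simpa using h), ih]
      simp [h]

-- The inverse index answers bp with exactly the keys of the cells whose value list contains bp.
theorem indexGetD_eq (bp : Int) (cells : List (Int × List Int))
    (d : PySem.Dict Int (List Int)) :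
    (cells.foldl (fun idx cell =>
        (PySem.List.dedup cell.2).foldl (fun idx e => idx.modify e [] (· ++ [cell.1])) idx)
      d).getD bp []
    = d.getD bp [] ++ (cells.filter (fun c => c.2.contains bp)).map (·.1) := by
  induction cells generalizing d with
  | nil => simp
  | cons c cs ih =>
    simp only [List.foldl_cons, List.filter_cons]
    rw [ih]
    have hmap : (PySem.List.dedup c.2).foldl (fun idx e => idx.modify e [] (· ++ [c.1])) d
        = ((PySem.List.dedup c.2).map (fun e => (e, c.1))).foldl
            (fun idx p => idx.modify p.1 [] (· ++ [p.2])) d := by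
      rw [List.foldl_map]
    rw [hmap, PySem.Dict.getD_foldl_modify_append]
    have hfil : (((PySem.List.dedup c.2).map (fun e => (e, c.1))).filter
          (fun p => p.1 == bp)).map (·.2)
        = if c.2.contains bp then [c.1] else [] := by
      rw [List.filter_map]
      have hsf : ((PySem.List.dedup c.2).filter ((fun p => p.1 == bp) ∘ (fun e => (e, c.1))))
          = (PySem.List.dedup c.2).filter (· == bp) := rfl
      rw [hsf, List.filter_beq]
      by_cases hm : bp ∈ c.2
      · have h1 : (PySem.List.dedup c.2).count bp = 1 :=
          List.count_eq_one_of_mem (PySem.List.nodup_dedup _)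
            (by simpa [PySem.List.mem_dedup] using hm)
        rw [h1]
        simp [hm]
      · have h0 : (PySem.List.dedup c.2).count bp = 0 := by
          rw [List.count_eq_zero]
          simpa [PySem.List.mem_dedup] using hm
        rw [h0]
        simp [hm]
    rw [hfil]
    by_cases h : bp ∈ c.2 <;> simp [h, List.append_assoc]

-- ===== VERDICT (by name: the statement is the Claim_ definition above) =====
theorem findRelevantCellsForBreakpoints_spec : Claim_equal_findRelevantCellsForBreakpoints := by
  intro breakpoints cells _
  show findRelevantCellsForBreakpoints breakpoints cells
      = findRelevantCellsForBreakpoints_alt breakpoints cells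
  unfold findRelevantCellsForBreakpoints findRelevantCellsForBreakpoints_alt
  have hfun : (fun (nc : PySem.Dict Int (List Int)) (bp : Int) =>
        cells.foldl (fun nc cell =>
            if cell.2.contains bp then nc.insert bp (nc.getD bp [] ++ [cell.1]) else nc)
          (nc.insert bp []))
      = (fun (nc : PySem.Dict Int (List Int)) (bp : Int) =>
          nc.insert bp ((cells.foldl (fun idx cell =>
              (PySem.List.dedup cell.2).foldl (fun idx e => idx.modify e [] (· ++ [cell.1])) idx)
            PySem.Dict.empty).getD bp [])) := by
    funext nc bp
    rw [innerA_eq, indexGetD_eq, PySem.Dict.getD_empty, List.nil_append]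
  rw [hfun]
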